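-- pv_equiv track=rewrite | github.com/LePips/UofUCatalogParser | campus.py | calculateSemesterIDs
-- ===== SOURCE A (Python) =====
-- def calculateSemesterIDs(lowerBound = None):
--     semesterYears = [id for id in range(988, 1225) if str(id)[-1] in ['4', '6', '8']]
--
--     if lowerBound:
--         semesterYears = [id for id in semesterYears if id >= lowerBound]
--
--     semesterIDs = [str(id).zfill(4) for id in semesterYears]
--
--     semesterMap = {}
--
--     for year in semesterYears:
--         stringID = str(year).zfill(4)
--         adjustedYear = str(1900 + int(stringID[:3]))
--
--         if stringID[3] == '4':
--             semesterMap[f'Spring{ adjustedYear }'] = stringID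
--         elif stringID[3] == '6':
--             semesterMap[f'Summer{ adjustedYear }'] = stringID
--         elif stringID[3] == '8':
--             semesterMap[f'Fall{ adjustedYear }'] = stringID
--
--     return semesterMap
-- ===== SOURCE B (Python) =====
-- def calculateSemesterIDs(lowerBound = None):
--     semesterMap = {}
--     for year in range(1998, 2023):
--         for name, suffix in (('Spring', 4), ('Summer', 6), ('Fall', 8)):
--             idnum = (year - 1900) * 10 + suffix
--             if 988 <= idnum < 1225 and (not lowerBound or idnum >= lowerBound):
--                 semesterMap[f'{name}{year}'] = str(idnum).zfill(4)
--     return semesterMap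
-- ===== Notes on version B (the rewrite author's own statement) =====
-- stated objective: alternative
-- what changed: B iterates calendar years 1998-2022 with a (season, suffix) table and constructs each ID as (year-1900)*10+suffix, instead of A's scan of the numeric range 988-1224 that decodes each ID's digits via string slicing; the unused semesterIDs list is dropped.
import Mathlib
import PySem

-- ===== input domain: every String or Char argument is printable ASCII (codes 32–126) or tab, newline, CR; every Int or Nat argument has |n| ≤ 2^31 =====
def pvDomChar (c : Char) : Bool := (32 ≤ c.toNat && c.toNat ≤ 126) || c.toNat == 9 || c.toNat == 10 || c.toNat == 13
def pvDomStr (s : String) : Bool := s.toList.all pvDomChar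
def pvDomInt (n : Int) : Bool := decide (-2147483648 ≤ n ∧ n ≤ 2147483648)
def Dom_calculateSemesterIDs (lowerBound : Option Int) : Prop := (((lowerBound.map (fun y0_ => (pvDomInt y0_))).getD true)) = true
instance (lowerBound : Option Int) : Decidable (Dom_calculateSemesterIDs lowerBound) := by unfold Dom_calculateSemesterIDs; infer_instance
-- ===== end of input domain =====

-- B constructs each semester ID from (year, season) over 1998..2022 instead of scanning the
-- numeric ID range and decoding each ID's digits; objective: an alternative decomposition of the same output.

-- ===== PORT A =====
def calculateSemesterIDs (lowerBound : Option Int) : List (String × String) :=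
  -- semesterYears = [id for id in range(988, 1225) if str(id)[-1] in ['4','6','8']]
  let semesterYears := (PySem.List.pyRange 988 1225 1).filter
    (fun id => decide ((PySem.Str.pyGet? (PySem.Int.toStr id) (-1)).getD ' ' ∈ ['4', '6', '8']))
    -- str(id) is never empty, so the [-1] index never raises; getD ' ' is unreachable
  -- if lowerBound: … (Python truthiness: None and 0 are falsy)
  let semesterYears :=
    match lowerBound with
    | none => semesterYears
    | some b => if b = 0 then semesterYears else semesterYears.filter (fun id => decide (b ≤ id))
  -- semesterIDs = [str(id).zfill(4) for id in semesterYears]  (computed by A but never used)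
  let _semesterIDs := semesterYears.map (fun id => PySem.Str.zfill (PySem.Int.toStr id) 4)
  let semesterMap := semesterYears.foldl (fun (m : PySem.Dict String String) year =>
    let stringID := PySem.Str.zfill (PySem.Int.toStr year) 4
    -- int(stringID[:3]) always succeeds (three digits), so getD 0 is unreachable
    let adjustedYear := PySem.Int.toStr (1900 + (PySem.Int.ofStr? (PySem.Str.slice stringID none (some 3))).getD 0)
    if (PySem.Str.pyGet? stringID 3).getD ' ' = '4' then m.insert ("Spring" ++ adjustedYear) stringID
    else if (PySem.Str.pyGet? stringID 3).getD ' ' = '6' then m.insert ("Summer" ++ adjustedYear) stringID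
    else if (PySem.Str.pyGet? stringID 3).getD ' ' = '8' then m.insert ("Fall" ++ adjustedYear) stringID
    else m) PySem.Dict.empty
  semesterMap.items

-- ===== PORT B =====
def calculateSemesterIDs_alt (lowerBound : Option Int) : List (String × String) :=
  ((PySem.List.pyRange 1998 2023 1).foldl (fun (m : PySem.Dict String String) year =>
    [("Spring", (4 : Int)), ("Summer", 6), ("Fall", 8)].foldl (fun m ns =>
      let idnum := (year - 1900) * 10 + ns.2
      -- 'not lowerBound or idnum >= lowerBound' (short-circuit keeps None away from >=)
      if (decide (988 ≤ idnum) && decide (idnum < 1225)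
          && (match lowerBound with
              | none => true
              | some b => decide (b = 0) || decide (b ≤ idnum))) then
        m.insert (ns.1 ++ PySem.Int.toStr year) (PySem.Str.zfill (PySem.Int.toStr idnum) 4)
      else m) m) PySem.Dict.empty).items

-- ===== PRECONDITION & SPEC =====
def Spec_calculateSemesterIDs (lowerBound : Option Int) (out : List (String × String)) : Prop := out = calculateSemesterIDs_alt lowerBound
instance (lowerBound : Option Int) (out : List (String × String)) : Decidable (Spec_calculateSemesterIDs lowerBound out) := by unfold Spec_calculateSemesterIDs; infer_instance

-- ===== CLAIM (what is proved, stated in full; the proofs are below) =====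
def Claim_equal_calculateSemesterIDs : Prop := ∀ (lowerBound : Option Int), Dom_calculateSemesterIDs lowerBound → Spec_calculateSemesterIDs lowerBound (calculateSemesterIDs lowerBound)

-- ===== LEMMAS AND PROOFS =====

-- the insert step both dicts are built with
def pvIns (d : PySem.Dict String String) (p : String × String) : PySem.Dict String String :=
  d.insert p.1 p.2

-- the (0 or 1) entries A's loop body inserts for one id
def pvPairsA (id : Int) : List (String × String) :=
  let stringID := PySem.Str.zfill (PySem.Int.toStr id) 4
  let adjustedYear := PySem.Int.toStr (1900 + (PySem.Int.ofStr? (PySem.Str.slice stringID none (some 3))).getD 0)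
  if (PySem.Str.pyGet? stringID 3).getD ' ' = '4' then [("Spring" ++ adjustedYear, stringID)]
  else if (PySem.Str.pyGet? stringID 3).getD ' ' = '6' then [("Summer" ++ adjustedYear, stringID)]
  else if (PySem.Str.pyGet? stringID 3).getD ' ' = '8' then [("Fall" ++ adjustedYear, stringID)]
  else []

-- the (0 or 1) entries B's inner body inserts for one (year, (name, suffix))
def pvIdOf (t : Int × (String × Int)) : Int := (t.1 - 1900) * 10 + t.2.2
def pvCondB (lb : Option Int) (t : Int × (String × Int)) : Bool :=
  decide (988 ≤ pvIdOf t) && decide (pvIdOf t < 1225)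
    && (match lb with | none => true | some b => decide (b = 0) || decide (b ≤ pvIdOf t))
def pvEntryB (t : Int × (String × Int)) : String × String :=
  (t.2.1 ++ PySem.Int.toStr t.1, PySem.Str.zfill (PySem.Int.toStr (pvIdOf t)) 4)
def pvPairsB (lb : Option Int) (t : Int × (String × Int)) : List (String × String) :=
  if pvCondB lb t then [pvEntryB t] else []

-- A's id list and B's (year, season) grid, as closed terms
def pvL : List Int := (PySem.List.pyRange 988 1225 1).filter
  (fun id => decide ((PySem.Str.pyGet? (PySem.Int.toStr id) (-1)).getD ' ' ∈ ['4', '6', '8']))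
def pvSeasons : List (String × Int) := [("Spring", (4 : Int)), ("Summer", 6), ("Fall", 8)]
def pvTrips : List (Int × (String × Int)) :=
  (PySem.List.pyRange 1998 2023 1).flatMap (fun y => pvSeasons.map (fun s => (y, s)))

-- generic loop-shape lemmas
theorem pvFoldlNested {α β δ : Type} (l : List α) (g : α → List β) (f : δ → β → δ) (d : δ) :
    l.foldl (fun d x => (g x).foldl f d) d = (l.flatMap g).foldl f d := by
  induction l generalizing d with
  | nil => rfl
  | cons x xs ih => simp only [List.foldl_cons, List.flatMap_cons, List.foldl_append, ih]

theorem pvFlatMapFilter {α β : Type} (l : List α) (q : α → Bool) (g : α → List β) :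
    (l.filter q).flatMap g = l.flatMap (fun x => if q x then g x else []) := by
  induction l with
  | nil => rfl
  | cons x xs ih => by_cases h : q x <;> simp [h, ih]

theorem pvFlatMapIfAnd {α β : Type} (l : List α) (c q : α → Bool) (g : α → List β) :
    l.flatMap (fun x => if c x && q x then g x else []) =
    (l.filter c).flatMap (fun x => if q x then g x else []) := by
  induction l with
  | nil => rfl
  | cons x xs ih =>
    cases h : c x <;>
      simp only [List.flatMap_cons, List.filter_cons, h, Bool.false_and, Bool.true_and,
        Bool.false_eq_true, if_false, List.nil_append, ih] <;>
      simp [List.flatMap_cons]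

theorem pvFlatMapIfEq {α β γ : Type} (p : Int → Bool) (l1 : List α) (l2 : List β)
    (i1 : α → Int) (g1 : α → List γ) (i2 : β → Int) (g2 : β → List γ)
    (h : l1.map (fun x => (i1 x, g1 x)) = l2.map (fun y => (i2 y, g2 y))) :
    l1.flatMap (fun x => if p (i1 x) then g1 x else []) =
    l2.flatMap (fun y => if p (i2 y) then g2 y else []) := by
  induction l1 generalizing l2 with
  | nil => cases l2 with
    | nil => rfl
    | cons y ys => simp at h
  | cons x xs ih =>
    cases l2 with
    | nil => simp at h
    | cons y ys =>
      simp only [List.map_cons, List.cons.injEq, Prod.mk.injEq] at h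
      obtain ⟨⟨hi, hg⟩, ht⟩ := h
      simp only [List.flatMap_cons, hi, hg, ih ys ht]

theorem pvFlatMapIfSublist {α β : Type} (l : List α) (q : α → Bool) (g : α → List β) :
    (l.flatMap (fun x => if q x then g x else [])).Sublist (l.flatMap g) := by
  induction l with
  | nil => simp
  | cons x xs ih =>
    by_cases h : q x <;> simp only [List.flatMap_cons, h, if_pos]
    · exact ih.append_left _
    · exact ih.trans (List.sublist_append_right _ _)

theorem pvFlatMapNested {α β γ : Type} (Y : List α) (S : List β) (F : α × β → List γ) :
    Y.flatMap (fun y => S.flatMap (fun s => F (y, s))) =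
    (Y.flatMap (fun y => S.map (fun s => (y, s)))).flatMap F := by
  induction Y with
  | nil => rfl
  | cons y ys ih => simp only [List.flatMap_cons, List.flatMap_append, ih, List.flatMap_map]

-- a fold of fresh-key inserts appends its pairs to the dict's items
theorem pvFoldlInsertItems (pairs : List (String × String)) (d : PySem.Dict String String)
    (h : (d.keys ++ pairs.map Prod.fst).Nodup) :
    (pairs.foldl pvIns d).items = d.items ++ pairs := by
  induction pairs generalizing d with
  | nil => simp
  | cons p ps ih =>
    have hnotmem : p.1 ∉ d.keys := by
      rw [List.nodup_append] at h
      intro hm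
      exact h.2.2 p.1 hm p.1 (by simp) rfl
    have hc : d.contains p.1 = false := by
      rw [← Bool.not_eq_true, PySem.Dict.contains_iff_mem_keys]
      exact hnotmem
    have hkeys := PySem.Dict.keys_insert_of_not_contains d p.2 hc
    have hitems := PySem.Dict.items_insert_of_not_contains d p.2 hc
    have h' : ((d.insert p.1 p.2).keys ++ ps.map Prod.fst).Nodup := by
      rw [hkeys, List.append_assoc]
      simpa using h
    rw [List.foldl_cons]
    show (ps.foldl pvIns (d.insert p.1 p.2)).items = _
    rw [ih _ h', hitems]
    simp

-- A's loop body inserts exactly pvPairsA year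
theorem pvBodyA (l : List Int) (d : PySem.Dict String String) :
    l.foldl (fun (m : PySem.Dict String String) year =>
      let stringID := PySem.Str.zfill (PySem.Int.toStr year) 4
      let adjustedYear := PySem.Int.toStr (1900 + (PySem.Int.ofStr? (PySem.Str.slice stringID none (some 3))).getD 0)
      if (PySem.Str.pyGet? stringID 3).getD ' ' = '4' then m.insert ("Spring" ++ adjustedYear) stringID
      else if (PySem.Str.pyGet? stringID 3).getD ' ' = '6' then m.insert ("Summer" ++ adjustedYear) stringID
      else if (PySem.Str.pyGet? stringID 3).getD ' ' = '8' then m.insert ("Fall" ++ adjustedYear) stringID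
      else m) d
    = l.foldl (fun m year => (pvPairsA year).foldl pvIns m) d := by
  apply PySem.List.foldl_congr_mem
  intro acc x _
  simp only [pvPairsA]
  split
  · rfl
  · split
    · rfl
    · split <;> rfl

-- B's inner body inserts exactly pvPairsB lb (year, ns)
theorem pvBodyB (lb : Option Int) (year : Int) (l : List (String × Int)) (d : PySem.Dict String String) :
    l.foldl (fun (m : PySem.Dict String String) ns =>
      let idnum := (year - 1900) * 10 + ns.2
      if (decide (988 ≤ idnum) && decide (idnum < 1225)
          && (match lb with
              | none => true
              | some b => decide (b = 0) || decide (b ≤ idnum))) then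
        m.insert (ns.1 ++ PySem.Int.toStr year) (PySem.Str.zfill (PySem.Int.toStr idnum) 4)
      else m) d
    = l.foldl (fun m ns => (pvPairsB lb (year, ns)).foldl pvIns m) d := by
  apply PySem.List.foldl_congr_mem
  intro acc x _
  simp only [pvPairsB, pvCondB, pvEntryB, pvIdOf]
  split <;> (split <;> rename_i hc <;>
    simp only [Bool.and_eq_true, Bool.or_eq_true, decide_eq_true_eq, Bool.and_true] at hc <;>
    simp [hc, pvIns])

-- closed facts, checked by kernel evaluation
set_option maxRecDepth 200000 in
set_option maxHeartbeats 2000000 in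
theorem pvMapEq :
    pvL.map (fun id => (id, pvPairsA id)) =
    (pvTrips.filter (fun t => decide (988 ≤ pvIdOf t) && decide (pvIdOf t < 1225))).map
      (fun t => (pvIdOf t, [pvEntryB t])) := by decide

set_option maxRecDepth 200000 in
set_option maxHeartbeats 2000000 in
theorem pvNodupA : ((pvL.flatMap pvPairsA).map Prod.fst).Nodup := by decide

set_option maxRecDepth 200000 in
set_option maxHeartbeats 2000000 in
theorem pvNodupB : ((pvTrips.flatMap (fun t => [pvEntryB t])).map Prod.fst).Nodup := by decide

-- the two entry streams agree for ANY admission predicate p on the id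
theorem pvMain (p : Int → Bool) :
    pvL.flatMap (fun id => if p id then pvPairsA id else []) =
    pvTrips.flatMap (fun t =>
      if (decide (988 ≤ pvIdOf t) && decide (pvIdOf t < 1225)) && p (pvIdOf t)
      then [pvEntryB t] else []) := by
  rw [pvFlatMapIfAnd]
  exact pvFlatMapIfEq p _ _ (fun id => id) pvPairsA pvIdOf (fun t => [pvEntryB t]) pvMapEq

-- A's result as a flat entry list
theorem pvAflat (ys : List Int)
    (h : ((ys.flatMap pvPairsA).map Prod.fst).Nodup) :
    (ys.foldl (fun m year => (pvPairsA year).foldl pvIns m) PySem.Dict.empty).items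
      = ys.flatMap pvPairsA := by
  rw [pvFoldlNested]
  have := pvFoldlInsertItems (ys.flatMap pvPairsA) PySem.Dict.empty (by simpa using h)
  simpa using this

theorem pvNodupA_filter (q : Int → Bool) :
    (((pvL.filter q).flatMap pvPairsA).map Prod.fst).Nodup := by
  apply List.Nodup.sublist _ pvNodupA
  apply List.Sublist.map
  rw [pvFlatMapFilter]
  exact pvFlatMapIfSublist pvL q pvPairsA

-- B's result as a flat entry list
theorem pvBflat (lb : Option Int) :
    calculateSemesterIDs_alt lb = pvTrips.flatMap (pvPairsB lb) := by
  simp only [calculateSemesterIDs_alt]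
  rw [PySem.List.foldl_congr_mem _ _
    (fun (m : PySem.Dict String String) year =>
      ([("Spring", (4:Int)), ("Summer", 6), ("Fall", 8)].flatMap (fun s => pvPairsB lb (year, s))).foldl pvIns m) _
    (fun acc y _ => by rw [pvBodyB lb y _ acc, pvFoldlNested])]
  rw [pvFoldlNested, pvFlatMapNested]
  simp only [pvTrips, pvSeasons]
  have hnd : (((((PySem.List.pyRange 1998 2023 1).flatMap
      (fun y => ([("Spring", (4:Int)), ("Summer", 6), ("Fall", 8)].map (fun s => (y, s))))).flatMap
        (pvPairsB lb))).map Prod.fst).Nodup := by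
    apply List.Nodup.sublist _ (by simpa only [pvTrips, pvSeasons] using pvNodupB)
    apply List.Sublist.map
    exact pvFlatMapIfSublist _ (pvCondB lb) (fun t => [pvEntryB t])
  rw [pvFoldlInsertItems _ _ (by simpa using hnd)]
  exact List.nil_append _

theorem pvL_def : pvL = (PySem.List.pyRange 988 1225 1).filter
    (fun id => decide ((PySem.Str.pyGet? (PySem.Int.toStr id) (-1)).getD ' ' ∈ ['4', '6', '8'])) := rfl

-- flatMap congruence helpers for the three truthiness cases
theorem pvCongrB (lb : Option Int) (f : Int × (String × Int) → List (String × String))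
    (h : ∀ t, f t = pvPairsB lb t) :
    pvTrips.flatMap f = pvTrips.flatMap (pvPairsB lb) :=
  congrArg (fun g => List.flatMap g pvTrips) (funext h)

theorem pvAfull : pvL.flatMap pvPairsA =
    pvL.flatMap (fun id => if (fun (_ : Int) => true) id then pvPairsA id else []) :=
  congrArg (fun g => List.flatMap g pvL) (funext fun id => by simp)

-- ===== VERDICT (by name: the statement is the Claim_ definition above) =====
theorem calculateSemesterIDs_spec : Claim_equal_calculateSemesterIDs := by
  intro lb _
  show calculateSemesterIDs lb = calculateSemesterIDs_alt lb
  rw [pvBflat]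
  rcases lb with _ | b
  · -- lowerBound = None is falsy: no filtering on either side
    simp only [calculateSemesterIDs]
    rw [← pvL_def]
    rw [pvBodyA, pvAflat _ pvNodupA, pvAfull, pvMain (fun _ => true)]
    exact pvCongrB none _ (fun t => by simp [pvPairsB, pvCondB])
  · by_cases hb : b = 0
    · -- lowerBound = 0 is falsy too: no filtering on either side
      subst hb
      simp only [calculateSemesterIDs]
      rw [← pvL_def]
      rw [if_pos trivial, pvBodyA, pvAflat _ pvNodupA, pvAfull, pvMain (fun _ => true)]
      exact pvCongrB (some 0) _ (fun t => by simp [pvPairsB, pvCondB])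
    · -- truthy lowerBound b: both sides keep exactly the ids ≥ b
      simp only [calculateSemesterIDs, if_neg hb]
      rw [← pvL_def]
      rw [pvBodyA, pvAflat _ (pvNodupA_filter _), pvFlatMapFilter, pvMain (fun n => decide (b ≤ n))]
      exact pvCongrB (some b) _ (fun t => by simp [pvPairsB, pvCondB, hb])
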